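-- pv_equiv track=rewrite | github.com/Demon000/android_tools | blob_list.py | _extract_subdir_file_paths
-- ===== SOURCE A (Python) =====
-- def _extract_subdir_file_paths(file_paths, subdirs):
--     '''
--     Extract file paths that are found under `subdir` from a list of file paths.
--
--     Args:
--         file_paths (list): A list of file paths to extract from.
--         subdirs (list): A list of subdirs to match.
--
--     Returns:
--         list: A list of all the extracted file paths.
--     '''
--
--     subdir_file_paths = []
--
--     for file_path in file_paths:
--         if subdirs:
--             found_in_subdirs = False
--
--             for subdir in subdirs:
--                 if file_path.startswith(subdir):
--                     found_in_subdirs = True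
--                     break
--
--             if not found_in_subdirs:
--                 continue
--
--         subdir_file_paths.append(file_path)
--
--     for file_path in subdir_file_paths:
--         file_paths.remove(file_path)
--
--     return subdir_file_paths
-- ===== SOURCE B (Python) =====
-- def _extract_subdir_file_paths(file_paths, subdirs):
--     subdir_set = set(subdirs)
--     matched = []
--     rest = []
--     for file_path in file_paths:
--         if not subdirs or any(file_path[:k] in subdir_set
--                               for k in range(len(file_path) + 1)):
--             matched.append(file_path)
--         else:
--             rest.append(file_path)
--     file_paths[:] = rest
--     return matched
-- ===== Notes on version B (the rewrite author's own statement) =====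
-- stated objective: faster
-- what changed: B replaces A's per-path linear scan over subdirs plus a quadratic second pass of list.remove with a hash set of subdirs queried once per prefix of each path, and a single-pass partition that rebuilds the remaining list instead of removing matched paths one by one.
import Mathlib
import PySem

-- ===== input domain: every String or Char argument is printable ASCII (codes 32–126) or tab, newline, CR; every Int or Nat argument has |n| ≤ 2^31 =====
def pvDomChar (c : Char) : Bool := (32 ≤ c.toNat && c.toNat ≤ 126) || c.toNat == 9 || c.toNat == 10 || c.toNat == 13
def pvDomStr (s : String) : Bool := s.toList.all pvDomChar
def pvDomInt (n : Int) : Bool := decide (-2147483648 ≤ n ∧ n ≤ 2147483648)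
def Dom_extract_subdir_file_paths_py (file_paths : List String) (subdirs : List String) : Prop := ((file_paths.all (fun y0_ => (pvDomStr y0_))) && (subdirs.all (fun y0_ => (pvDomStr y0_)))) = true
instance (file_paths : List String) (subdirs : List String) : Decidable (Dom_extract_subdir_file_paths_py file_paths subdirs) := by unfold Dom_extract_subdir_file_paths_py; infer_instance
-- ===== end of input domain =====

-- B replaces A's per-path scan over subdirs plus the second list.remove pass by a set of subdirs
-- queried on each prefix of a path and a one-pass partition; equivalence proved for the RETURN
-- value only (both Pythons mutate `file_paths` the same way; that side effect is not modeled).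

-- ===== PORT A =====
-- inner 'for subdir in subdirs: if file_path.startswith(subdir): found = True; break'
def pvFoundInSubdirs (file_path : String) : List String → Bool
  | [] => false
  | subdir :: rest =>
      if PySem.Str.startswith file_path subdir then true else pvFoundInSubdirs file_path rest

def extract_subdir_file_paths_py (file_paths : List String) (subdirs : List String) : List String :=
  -- first loop: build subdir_file_paths (the 'continue' = skip the append)
  file_paths.foldl (fun subdir_file_paths file_path =>
    if subdirs.isEmpty then subdir_file_paths ++ [file_path]
    else if pvFoundInSubdirs file_path subdirs then subdir_file_paths ++ [file_path]
    else subdir_file_paths) []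
  -- the second loop only mutates file_paths (file_paths.remove), not the returned list

-- ===== PORT B =====
-- 'any(file_path[:k] in subdir_set for k in range(len(file_path) + 1))'
def pvMatchesPrefix (subdir_set : PySem.Set String) (file_path : String) : Bool :=
  (PySem.List.pyRange 0 ((PySem.Str.len file_path : Int) + 1) 1).any
    (fun k => PySem.Set.contains subdir_set (PySem.Str.slice file_path none (some k)))

def extract_subdir_file_paths_py_alt (file_paths : List String) (subdirs : List String) : List String :=
  let subdir_set := PySem.Set.ofList subdirs
  let res := file_paths.foldl
    (fun (acc : List String × List String) file_path =>
      if subdirs.isEmpty || pvMatchesPrefix subdir_set file_path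
      then (acc.1 ++ [file_path], acc.2)
      else (acc.1, acc.2 ++ [file_path]))
    ([], [])
  res.1
  -- 'file_paths[:] = rest' is the same mutation A performs; not modeled (return value only)

-- ===== PRECONDITION & SPEC =====
def Spec_extract_subdir_file_paths_py (file_paths : List String) (subdirs : List String) (out : List String) : Prop := out = extract_subdir_file_paths_py_alt file_paths subdirs
instance (file_paths : List String) (subdirs : List String) (out : List String) : Decidable (Spec_extract_subdir_file_paths_py file_paths subdirs out) := by unfold Spec_extract_subdir_file_paths_py; infer_instance

-- ===== CLAIM (what is proved, stated in full; the proofs are below) =====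
def Claim_equal_extract_subdir_file_paths_py : Prop := ∀ (file_paths : List String) (subdirs : List String), Dom_extract_subdir_file_paths_py file_paths subdirs → Spec_extract_subdir_file_paths_py file_paths subdirs (extract_subdir_file_paths_py file_paths subdirs)

-- ===== LEMMAS AND PROOFS =====

-- A's inner scan finds a subdir iff some element of subdirs is a string prefix of file_path
theorem pvFoundInSubdirs_iff (p : String) (subdirs : List String) :
    pvFoundInSubdirs p subdirs = true ↔ ∃ s ∈ subdirs, s.toList <+: p.toList := by
  induction subdirs with
  | nil => simp [pvFoundInSubdirs]
  | cons s rest ih =>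
      simp only [pvFoundInSubdirs]
      by_cases h : PySem.Str.startswith p s = true
      · simp only [h, if_true, true_iff]
        exact ⟨s, List.mem_cons_self,
          (PySem.Chars.startswith_iff p.toList s.toList).mp (by simpa using h)⟩
      · rw [if_neg h]
        rw [ih]
        constructor
        · rintro ⟨t, ht, hpre⟩; exact ⟨t, List.mem_cons_of_mem _ ht, hpre⟩
        · rintro ⟨t, ht, hpre⟩
          rcases List.mem_cons.mp ht with rfl | ht'
          · exact absurd ((PySem.Chars.startswith_iff p.toList t.toList).mpr hpre)
              (by simp only [Bool.not_eq_true]; simpa using h)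
          · exact ⟨t, ht', hpre⟩

theorem toList_str_slice_to (p : String) (k : Nat) :
    (PySem.Str.slice p none (some (k : Int))).toList = p.toList.take k := by
  simp [PySem.Str.slice, PySem.List.slice_to_natCast]

-- B's prefix test agrees with A's scan
theorem pvMatchesPrefix_eq (p : String) (subdirs : List String) :
    pvMatchesPrefix (PySem.Set.ofList subdirs) p = pvFoundInSubdirs p subdirs := by
  rw [Bool.eq_iff_iff]
  unfold pvMatchesPrefix
  rw [List.any_eq_true, pvFoundInSubdirs_iff]
  constructor
  · rintro ⟨k, hk, hc⟩
    have hk' := (PySem.List.mem_pyRange_one).mp hk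
    have hmem : PySem.Str.slice p none (some k) ∈ PySem.Set.ofList subdirs :=
      (PySem.Set.contains_iff _ _).mp hc
    have hmem' : PySem.Str.slice p none (some k) ∈ subdirs := (PySem.Set.mem_ofList _ _).mp hmem
    refine ⟨_, hmem', ?_⟩
    obtain ⟨k0, rfl⟩ : ∃ k0 : Nat, k = (k0 : Int) := ⟨k.toNat, by omega⟩
    rw [toList_str_slice_to]
    exact List.take_prefix _ _
  · rintro ⟨s, hs, hpre⟩
    refine ⟨(s.toList.length : Int), ?_, ?_⟩
    · rw [PySem.List.mem_pyRange_one]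
      have := hpre.length_le
      simp only [PySem.Str.len_eq] at *
      omega
    · rw [PySem.Set.contains_iff, PySem.Set.mem_ofList]
      have heq : PySem.Str.slice p none (some (s.toList.length : Int)) = s := by
        have h1 : (PySem.Str.slice p none (some (s.toList.length : Int))).toList
            = p.toList.take s.toList.length := toList_str_slice_to p s.toList.length
        have h2 : p.toList.take s.toList.length = s.toList := (List.prefix_iff_eq_take.mp hpre).symm
        have : (PySem.Str.slice p none (some (s.toList.length : Int))).toList = s.toList := by
          rw [h1, h2]
        exact String.toList_inj.mp this
      rw [heq]; exact hs

-- the two folds build the same matched list (B also carries the 'rest' component)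
theorem fold_partition_fst (c : String → Bool) (l : List String) (acc1 acc2 : List String) :
    (l.foldl (fun (acc : List String × List String) p =>
        if c p then (acc.1 ++ [p], acc.2) else (acc.1, acc.2 ++ [p])) (acc1, acc2)).1
      = l.foldl (fun acc p => if c p then acc ++ [p] else acc) acc1 := by
  induction l generalizing acc1 acc2 with
  | nil => rfl
  | cons p rest ih =>
      simp only [List.foldl_cons]
      by_cases h : c p = true
      · simp only [h, if_true]; exact ih _ _
      · simp only [Bool.not_eq_true] at h; simp only [h, Bool.false_eq_true, if_false]; exact ih _ _

-- ===== VERDICT (by name: the statement is the Claim_ definition above) =====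
theorem extract_subdir_file_paths_py_spec : Claim_equal_extract_subdir_file_paths_py := by
  intro file_paths subdirs _
  unfold Spec_extract_subdir_file_paths_py extract_subdir_file_paths_py extract_subdir_file_paths_py_alt
  rw [fold_partition_fst (fun p => subdirs.isEmpty || pvMatchesPrefix (PySem.Set.ofList subdirs) p)]
  congr 1
  funext acc p
  rw [pvMatchesPrefix_eq]
  by_cases h : subdirs.isEmpty = true
  · simp [h]
  · simp only [Bool.not_eq_true] at h
    simp only [h, Bool.false_eq_true, if_false, Bool.false_or]
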